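-- pv_equiv track=rewrite | github.com/HomericIntelligence/ProjectHephaestus | hephaestus/validation/markdown.py | _count_missing_language_tags
-- ===== SOURCE A (Python) =====
-- def _count_missing_language_tags(lines: list[str]) -> int:
--     """Count code blocks without language tags."""
--     count = 0
--     in_code_block = False
--     for line in lines:
--         if line.strip().startswith("```"):
--             if not in_code_block:
--                 if line.strip() == "```":
--                     count += 1
--                 in_code_block = True
--             else:
--                 in_code_block = False
--     return count
-- ===== SOURCE B (Python) =====
-- def _count_missing_language_tags(lines: list[str]) -> int:
--     """Count code blocks without language tags."""
--     count = 0
--     i = 0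
--     n = len(lines)
--     while i < n:
--         if lines[i].strip().startswith("```"):
--             # opening fence: count it if bare, then skip the whole block body
--             # up to and including its closing fence
--             if lines[i].strip() == "```":
--                 count += 1
--             i += 1
--             while i < n and not lines[i].strip().startswith("```"):
--                 i += 1
--             i += 1
--         else:
--             i += 1
--     return count
-- ===== Notes on version B (the rewrite author's own statement) =====
-- stated objective: alternative
-- what changed: Replaces the stateful in_code_block toggle flag by a cursor-based block-skipping algorithm: an outer loop finds each opening fence (counting it if bare) and an inner loop skips the whole block body past its closing fence, so no boolean state machine remains.
import Mathlib
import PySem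

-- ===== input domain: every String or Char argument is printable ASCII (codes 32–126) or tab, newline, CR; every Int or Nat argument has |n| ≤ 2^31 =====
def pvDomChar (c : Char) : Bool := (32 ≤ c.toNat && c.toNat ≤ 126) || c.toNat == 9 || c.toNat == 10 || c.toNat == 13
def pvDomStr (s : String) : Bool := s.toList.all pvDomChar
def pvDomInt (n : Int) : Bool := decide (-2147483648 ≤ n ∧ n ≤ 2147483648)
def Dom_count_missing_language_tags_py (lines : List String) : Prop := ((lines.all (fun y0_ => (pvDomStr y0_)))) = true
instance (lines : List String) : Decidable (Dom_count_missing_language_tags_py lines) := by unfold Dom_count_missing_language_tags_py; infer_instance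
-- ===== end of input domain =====

-- B replaces A's stateful in_code_block toggle loop by a recursive block-skipping
-- algorithm (outer scan finds each opening fence, inner scan skips past its closing fence); objective: alternative.


-- ===== PORT A =====
-- literal transliteration of A's loop: state (count, in_code_block)
def count_missing_language_tags_py (lines : List String) : Int :=
  (lines.foldl
    (fun (st : Int × Bool) line =>
      if PySem.Str.startswith (PySem.Str.strip line) "```" then
        if !st.2 then
          ((if PySem.Str.strip line == "```" then st.1 + 1 else st.1), true)
        else
          (st.1, false)
      else st)
    (0, false)).1

-- ===== PORT B =====
-- B's inner while loop + slice rest[i+1:]: drop lines up to and including the next fence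
def pvDropToClose : List String → List String
  | [] => []
  | l :: ls => if PySem.Str.startswith (PySem.Str.strip l) "```" then ls else pvDropToClose ls

-- used by the port's termination proof
theorem pvDropToClose_length_le (ls : List String) : (pvDropToClose ls).length ≤ ls.length := by
  induction ls with
  | nil => simp [pvDropToClose]
  | cons l ls ih =>
    unfold pvDropToClose
    split
    · simp
    · exact Nat.le_trans ih (Nat.le_succ _)

def count_missing_language_tags_py_alt (lines : List String) : Int :=
  match lines with
  | [] => 0
  | head :: rest =>
    if PySem.Str.startswith (PySem.Str.strip head) "```" then
      (if PySem.Str.strip head == "```" then (1 : Int) else 0)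
        + count_missing_language_tags_py_alt (pvDropToClose rest)
    else
      count_missing_language_tags_py_alt rest
termination_by lines.length
decreasing_by
  · exact Nat.lt_succ_of_le (pvDropToClose_length_le rest)
  · exact Nat.lt_succ_self _

-- ===== PRECONDITION & SPEC =====
def Spec_count_missing_language_tags_py (lines : List String) (out : Int) : Prop := out = count_missing_language_tags_py_alt lines
instance (lines : List String) (out : Int) : Decidable (Spec_count_missing_language_tags_py lines out) := by unfold Spec_count_missing_language_tags_py; infer_instance

-- ===== CLAIM (what is proved, stated in full; the proofs are below) =====
def Claim_equal_count_missing_language_tags_py : Prop := ∀ (lines : List String), Dom_count_missing_language_tags_py lines → Spec_count_missing_language_tags_py lines (count_missing_language_tags_py lines)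

-- ===== LEMMAS AND PROOFS =====

-- abbreviation for A's loop body (proof-side only)
def pvStep (st : Int × Bool) (line : String) : Int × Bool :=
  if PySem.Str.startswith (PySem.Str.strip line) "```" then
    if !st.2 then
      ((if PySem.Str.strip line == "```" then st.1 + 1 else st.1), true)
    else
      (st.1, false)
  else st

-- while in a code block, A just scans to the closing fence and resets the flag
theorem pv_inblock (ls : List String) : ∀ c : Int,
    (ls.foldl pvStep (c, true)).1 = ((pvDropToClose ls).foldl pvStep (c, false)).1 := by
  induction ls with
  | nil => intro c; simp [pvDropToClose]
  | cons l ls ih =>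
    intro c
    unfold pvDropToClose
    by_cases hf : PySem.Str.startswith (PySem.Str.strip l) "```" = true
    · simp only [hf, if_true, List.foldl_cons, pvStep, Bool.not_true, Bool.false_eq_true,
        if_false]
    · rw [Bool.not_eq_true] at hf
      simp only [hf, Bool.false_eq_true, if_false, List.foldl_cons, pvStep, Bool.not_true]
      exact ih c

-- invariant: A's loop from a closed state computes c + B's recursive count
theorem pv_invariant (lines : List String) : ∀ c : Int,
    (lines.foldl pvStep (c, false)).1 = c + count_missing_language_tags_py_alt lines := by
  induction lines using count_missing_language_tags_py_alt.induct with
  | case1 => intro c; simp [count_missing_language_tags_py_alt]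
  | case2 head rest hf ih =>
    intro c
    rw [count_missing_language_tags_py_alt]
    simp only [hf, if_true, List.foldl_cons, pvStep, Bool.not_false]
    by_cases hb : (PySem.Str.strip head == "```") = true
    · simp only [hb, if_true]
      rw [pv_inblock, ih (c + 1)]
      ring
    · rw [Bool.not_eq_true] at hb
      simp only [hb, Bool.false_eq_true, if_false]
      rw [pv_inblock, ih c]
      ring
  | case3 head rest hf ih =>
    intro c
    rw [Bool.not_eq_true] at hf
    rw [count_missing_language_tags_py_alt]
    simp only [hf, Bool.false_eq_true, if_false, List.foldl_cons, pvStep]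
    exact ih c

-- ===== VERDICT (by name: the statement is the Claim_ definition above) =====
theorem count_missing_language_tags_py_spec : Claim_equal_count_missing_language_tags_py := by
  intro lines _
  unfold Spec_count_missing_language_tags_py count_missing_language_tags_py
  have h := pv_invariant lines 0
  rw [zero_add] at h
  exact h
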